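-- pv_equiv track=rewrite | github.com/filp8/algoritmi | algo2/batteria1/es9/es9vf.py | es9v
-- ===== SOURCE A (Python) =====
-- def es9v(grafo:list[list[int]],nodoStart:int,visitati:list[int])->int:
--     visitati[nodoStart] = 1
--     counterpozzi = 0
--     if grafo[nodoStart] == []:
--             counterpozzi += 1
--     for nextNodo in grafo[nodoStart]:
--         if visitati[nextNodo] == 0:
--             counterpozzi += es9v(grafo,nextNodo,visitati)
--     return counterpozzi
-- ===== SOURCE B (Python) =====
-- def es9v(grafo: list[list[int]], nodoStart: int, visitati: list[int]) -> int:
--     # Iterative DFS with an explicit stack instead of recursion.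
--     visitati[nodoStart] = 1
--     counterpozzi = 1 if grafo[nodoStart] == [] else 0
--     stack = grafo[nodoStart][::-1]
--     while stack:
--         n = stack.pop()
--         if visitati[n] == 0:
--             visitati[n] = 1
--             if grafo[n] == []:
--                 counterpozzi += 1
--             stack.extend(grafo[n][::-1])
--     return counterpozzi
-- ===== Notes on version B (the rewrite author's own statement) =====
-- stated objective: alternative
-- what changed: The recursive DFS with in-place marking is replaced by an iterative DFS with an explicit stack (push reversed adjacency, count a sink the first time a node is popped unvisited), removing recursion entirely.
-- outside the precondition, e.g. on es9v([[1, -1], [], [99]], 0, [0, 0]): A returns 1, B returns 1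
import Mathlib
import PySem

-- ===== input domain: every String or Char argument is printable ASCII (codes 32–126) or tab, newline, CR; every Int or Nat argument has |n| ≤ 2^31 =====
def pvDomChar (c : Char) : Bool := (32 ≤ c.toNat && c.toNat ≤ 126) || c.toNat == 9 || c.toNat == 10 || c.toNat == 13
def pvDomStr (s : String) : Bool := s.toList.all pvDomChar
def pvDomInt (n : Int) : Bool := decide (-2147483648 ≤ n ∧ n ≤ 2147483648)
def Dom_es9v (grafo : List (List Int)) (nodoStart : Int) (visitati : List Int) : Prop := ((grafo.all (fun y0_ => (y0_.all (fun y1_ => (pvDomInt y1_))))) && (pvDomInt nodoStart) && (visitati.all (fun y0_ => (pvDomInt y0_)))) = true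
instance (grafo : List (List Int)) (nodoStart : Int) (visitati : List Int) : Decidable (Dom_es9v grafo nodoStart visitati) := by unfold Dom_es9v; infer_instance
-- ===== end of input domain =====

-- B replaces A's recursive DFS by an iterative DFS with an explicit stack; both mutate
-- visitati identically in Python, and the equivalence proved is about the return value.

-- ===== PORT A =====
-- A is a recursive DFS that marks visitati in place; mutation is modelled by threading
-- the list. Python's recursion depth here is bounded by the number of nodes, so the
-- port uses fuel = visitati.length + 1 and returns none on exhaustion (proved
-- unreachable under Pre_ below); none also models A's IndexError.
mutual
def es9vA (fuel : Nat) (grafo : List (List Int)) (nodoStart : Int) (vis : List Int) :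
    Option (Int × List Int) :=
  match fuel with
  | 0 => none
  | fuel + 1 =>
    -- visitati[nodoStart] = 1 ; counterpozzi = 1 if grafo[nodoStart] == [] else 0
    match PySem.List.pySet? vis nodoStart 1, PySem.List.pyGet? grafo nodoStart with
    | some vis1, some adj => es9vLoop fuel grafo adj (if adj = [] then 1 else 0) vis1
    | _, _ => none
termination_by (fuel, 0)

-- the 'for nextNodo in grafo[nodoStart]' loop of A
def es9vLoop (fuel : Nat) (grafo : List (List Int)) (adj : List Int) (count : Int)
    (vis : List Int) : Option (Int × List Int) :=
  match adj with
  | [] => some (count, vis)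
  | next :: restAdj =>
    match PySem.List.pyGet? vis next with
    | some v =>
      if v = 0 then
        match es9vA fuel grafo next vis with
        | some (c, vis') => es9vLoop fuel grafo restAdj (count + c) vis'
        | none => none
      else es9vLoop fuel grafo restAdj count vis
    | none => none
termination_by (fuel, adj.length + 1)
end

def es9v (grafo : List (List Int)) (nodoStart : Int) (visitati : List Int) : Int :=
  match es9vA (visitati.length + 1) grafo nodoStart visitati with
  | some (c, _) => c
  | none => 0

-- ===== PORT B =====
-- number of zero entries of visitati; justifies termination of B's while loop
def pvZeros (vis : List Int) : Nat := vis.countP (· == 0)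

theorem pvZeros_pySetD_lt (vis : List Int) (n : Int)
    (h : PySem.List.pyGet? vis n = some 0) :
    pvZeros (PySem.List.pySetD vis n 1) < pvZeros vis := by
  cases hk : PySem.List.pyIdx? vis.length n with
  | none => simp [PySem.List.pyGet?, hk] at h
  | some k =>
    have h' : vis[k]? = some 0 := by simpa [PySem.List.pyGet?, hk] using h
    obtain ⟨hklt, hv⟩ := List.getElem?_eq_some_iff.mp h'
    have hset : PySem.List.pySetD vis n 1 = vis.set k 1 := by
      simp [PySem.List.pySetD, PySem.List.pySet?, hk]
    rw [hset]
    have hpos : 0 < vis.countP (· == 0) :=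
      List.countP_pos_iff.mpr ⟨vis[k], List.getElem_mem hklt, by simp [hv]⟩
    unfold pvZeros
    rw [List.countP_set hklt]
    have e1 : (vis[k] == (0:Int)) = true := by simp [hv]
    have e2 : (((1:Int)) == (0:Int)) = false := by decide
    rw [e1, e2]
    have d1 : (if (true = true) then 1 else 0) = 1 := rfl
    have d0 : (if (false = true) then 1 else 0) = 0 := rfl
    rw [d1, d0]
    omega

-- B's while loop; the Lean list models the Python stack with head = top (Python pops
-- from the end and pushes grafo[n][::-1], so popping yields adjacency in list order,
-- which the 'adj ++ rest' push reproduces exactly).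
def es9vB (grafo : List (List Int)) (vis : List Int) (stack : List Int) (count : Int) : Int :=
  match stack with
  | [] => count
  | n :: rest =>
    match hg : PySem.List.pyGet? vis n with
    | some v =>
      if hv : v = 0 then
        es9vB grafo (PySem.List.pySetD vis n 1)
          (PySem.List.pyGetD grafo n [] ++ rest)
          (count + if PySem.List.pyGetD grafo n [] = [] then 1 else 0)
      else es9vB grafo vis rest count
    | none => es9vB grafo vis rest count
termination_by (pvZeros vis, stack.length)
decreasing_by
  · exact Prod.Lex.left _ _ (pvZeros_pySetD_lt vis n (hv ▸ hg))
  · exact Prod.Lex.right _ (Nat.lt_succ_self _)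
  · exact Prod.Lex.right _ (Nat.lt_succ_self _)

def es9v_alt (grafo : List (List Int)) (nodoStart : Int) (visitati : List Int) : Int :=
  -- visitati[nodoStart] = 1; counter = 1 if grafo[nodoStart] == [] else 0;
  -- stack = grafo[nodoStart][::-1]  (head-as-top representation: the list itself)
  match PySem.List.pySet? visitati nodoStart 1, PySem.List.pyGet? grafo nodoStart with
  | some vis1, some adj => es9vB grafo vis1 adj (if adj = [] then 1 else 0)
  | _, _ => 0

-- ===== PRECONDITION & SPEC =====

-- the cell a Python index i selects in a list of length L (negative = from the end)
def pvRes (L : Nat) (i : Int) : Nat := (PySem.List.pyIdx? L i).getD 0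

-- the adjacency row node n selects (Python indexing, negative = from the end)
def pvRow (grafo : List (List Int)) (n : Int) : List Int :=
  grafo.getD (pvRes grafo.length n) []

-- add v to the set S if it is a node the DFS could enter: in range of visitati and
-- its (start-marked) visitati cell still 0
def pvAdd (lv : Nat) (vis1 : List Int) (S : List Int) (v : Int) : List Int :=
  if PySem.Raise.InRange lv v ∧ vis1.getD (pvRes lv v) 0 = 0 then
    (if v ∈ S then S else S ++ [v])
  else S

-- one closure step: add every enterable successor of a member of S
def pvStep (grafo : List (List Int)) (lv : Nat) (vis1 : List Int) (S : List Int) :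
    List Int :=
  (S.flatMap (pvRow grafo)).foldl (pvAdd lv vis1) S

-- the set of nodes reachable from nodoStart through still-unvisited cells: the
-- textbook reachable-set closure of the INPUT graph (a membership condition on the
-- input, not a run of either port: the ports never compute this set). Applying the
-- monotone one-step closure 2*|visitati| + 3 times reaches its fixpoint (proved
-- below: the set can hold at most 2*|visitati| + 2 distinct values).
def pvE (grafo : List (List Int)) (nodoStart : Int) (visitati : List Int) : List Int :=
  (pvStep grafo visitati.length
    (visitati.set (pvRes visitati.length nodoStart) 1))^[2 * visitati.length + 3]
    [nodoStart]

-- a well-formed adjacency row: every entry indexes visitati, and entries whose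
-- (start-marked) visitati cell is still 0 belong to the closure set E
abbrev pvRowOk (lv : Nat) (vis1 : List Int) (E : List Int) (adj : List Int) : Prop :=
  ∀ v ∈ adj, PySem.Raise.InRange lv v ∧ (vis1.getD (pvRes lv v) 0 = 0 → v ∈ E)

-- Pre_ excludes exactly the inputs where some index access of the traversal (as
-- over-approximated by the static closure pvE) is out of range — i.e. A's IndexError
-- inputs, plus (only when len(grafo) ≠ len(visitati) and a row holds two aliased
-- entries v and v - len(visitati) naming the same visitati cell but different grafo
-- rows) rare inputs where A happens to return because dynamic marking skips the
-- malformed aliased row; see the cites in the claim.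
def Pre_es9v (grafo : List (List Int)) (nodoStart : Int) (visitati : List Int) : Prop :=
  PySem.Raise.InRange grafo.length nodoStart ∧
  PySem.Raise.InRange visitati.length nodoStart ∧
  ∀ n ∈ pvE grafo nodoStart visitati,
    PySem.Raise.InRange grafo.length n ∧
    pvRowOk visitati.length
      (visitati.set (pvRes visitati.length nodoStart) 1)
      (pvE grafo nodoStart visitati) (pvRow grafo n)
instance (grafo : List (List Int)) (nodoStart : Int) (visitati : List Int) : Decidable (Pre_es9v grafo nodoStart visitati) := by unfold Pre_es9v; infer_instance

def pvWitness_es9v : List (List Int) × Int × List Int := ([[1, 2], [2], []], 0, [0, 0, 0])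

def Spec_es9v (grafo : List (List Int)) (nodoStart : Int) (visitati : List Int) (out : Int) : Prop := out = es9v_alt grafo nodoStart visitati
instance (grafo : List (List Int)) (nodoStart : Int) (visitati : List Int) (out : Int) : Decidable (Spec_es9v grafo nodoStart visitati out) := by unfold Spec_es9v; infer_instance

-- ===== CLAIM (what is proved, stated in full; the proofs are below) =====
def Claim_equal_es9v : Prop := ∀ (grafo : List (List Int)) (nodoStart : Int) (visitati : List Int), Dom_es9v grafo nodoStart visitati → Pre_es9v grafo nodoStart visitati → Spec_es9v grafo nodoStart visitati (es9v grafo nodoStart visitati)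

-- ===== LEMMAS AND PROOFS =====

-- resolver facts
theorem pvRes_spec (L : Nat) (i : Int) (h : PySem.Raise.InRange L i) :
    PySem.List.pyIdx? L i = some (pvRes L i) ∧ pvRes L i < L := by
  obtain ⟨h1, h2⟩ := h
  unfold pvRes PySem.List.pyIdx?
  by_cases h0 : 0 ≤ i
  · rw [if_pos h0, if_pos h2]
    simp only [Option.getD_some]
    exact ⟨trivial, by omega⟩
  · rw [if_neg h0, if_pos h1]
    simp only [Option.getD_some]
    exact ⟨trivial, by omega⟩

theorem pyGet?_eq_some_getD {α : Type} (xs : List α) (i : Int) (d : α)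
    (h : PySem.Raise.InRange xs.length i) :
    PySem.List.pyGet? xs i = some (xs.getD (pvRes xs.length i) d) := by
  obtain ⟨hk, hlt⟩ := pvRes_spec xs.length i h
  simp [PySem.List.pyGet?, hk, List.getElem?_eq_getElem hlt]

theorem pySetD_eq_set (xs : List Int) (i : Int) (v : Int)
    (h : PySem.Raise.InRange xs.length i) :
    PySem.List.pySetD xs i v = xs.set (pvRes xs.length i) v := by
  obtain ⟨hk, _⟩ := pvRes_spec xs.length i h
  simp [PySem.List.pySetD, PySem.List.pySet?, hk]

theorem pySet?_eq_set (xs : List Int) (i : Int) (v : Int)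
    (h : PySem.Raise.InRange xs.length i) :
    PySem.List.pySet? xs i v = some (xs.set (pvRes xs.length i) v) := by
  obtain ⟨hk, _⟩ := pvRes_spec xs.length i h
  simp [PySem.List.pySet?, hk]

theorem pvZeros_set (vis : List Int) (j : Nat) (hj : j < vis.length) :
    pvZeros (vis.set j 1) = if vis[j] = 0 then pvZeros vis - 1 else pvZeros vis := by
  unfold pvZeros
  rw [List.countP_set hj]
  by_cases h : vis[j] = 0 <;> simp [h]

theorem pvZeros_pos_of_get (vis : List Int) (n : Int)
    (h : PySem.List.pyGet? vis n = some 0) : 0 < pvZeros vis := by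
  cases hk : PySem.List.pyIdx? vis.length n with
  | none => simp [PySem.List.pyGet?, hk] at h
  | some k =>
    have h' : vis[k]? = some 0 := by simpa [PySem.List.pyGet?, hk] using h
    obtain ⟨hklt, hv⟩ := List.getElem?_eq_some_iff.mp h'
    exact List.countP_pos_iff.mpr ⟨vis[k], List.getElem_mem hklt, by simp [hv]⟩

-- ---- closure machinery: pvE is a fixpoint of pvStep and contains the start node ----

theorem pvAdd_subset (lv : Nat) (vis1 : List Int) (S : List Int) (v : Int) :
    S ⊆ pvAdd lv vis1 S v := by
  unfold pvAdd; split_ifs <;> simp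

theorem pvFold_subset (lv : Nat) (vis1 : List Int) :
    ∀ (xs S : List Int), S ⊆ xs.foldl (pvAdd lv vis1) S := by
  intro xs
  induction xs with
  | nil => intro S; simp
  | cons x xs ih =>
    intro S
    exact (pvAdd_subset lv vis1 S x).trans (by simpa [List.foldl] using ih (pvAdd lv vis1 S x))

theorem pvFold_mem (lv : Nat) (vis1 : List Int) :
    ∀ (xs S : List Int) (v : Int), v ∈ xs → PySem.Raise.InRange lv v →
      vis1.getD (pvRes lv v) 0 = 0 → v ∈ xs.foldl (pvAdd lv vis1) S := by
  intro xs
  induction xs with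
  | nil => intro S v h; simp at h
  | cons x xs ih =>
    intro S v hmem hIR h0
    rcases List.mem_cons.mp hmem with rfl | hmem
    · have hv : v ∈ pvAdd lv vis1 S v := by
        unfold pvAdd
        rw [if_pos ⟨hIR, h0⟩]
        split_ifs with hin
        · exact hin
        · simp
      exact pvFold_subset lv vis1 xs (pvAdd lv vis1 S v) hv
    · exact ih _ v hmem hIR h0

theorem pvFold_append (lv : Nat) (vis1 : List Int) :
    ∀ (xs S : List Int), ∃ t, xs.foldl (pvAdd lv vis1) S = S ++ t := by
  intro xs
  induction xs with
  | nil => intro S; exact ⟨[], by simp⟩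
  | cons x xs ih =>
    intro S
    have hu : ∃ u, pvAdd lv vis1 S x = S ++ u := by
      unfold pvAdd
      split_ifs
      · exact ⟨[], by simp⟩
      · exact ⟨[x], rfl⟩
      · exact ⟨[], by simp⟩
    obtain ⟨u, hu⟩ := hu
    obtain ⟨t, ht⟩ := ih (pvAdd lv vis1 S x)
    exact ⟨u ++ t, by rw [List.foldl_cons, ht, hu, List.append_assoc]⟩

-- invariant: S has no duplicates and every member is the start node or in range
def pvSInv (lv : Nat) (start : Int) (S : List Int) : Prop :=
  S.Nodup ∧ ∀ v ∈ S, v = start ∨ PySem.Raise.InRange lv v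

theorem pvAdd_inv (lv : Nat) (vis1 : List Int) (start : Int) (S : List Int) (v : Int)
    (h : pvSInv lv start S) : pvSInv lv start (pvAdd lv vis1 S v) := by
  unfold pvAdd
  split_ifs with h1 h2
  · exact h
  · constructor
    · rw [List.nodup_append]
      exact ⟨h.1, List.nodup_singleton v, by
        intro a ha b hb
        simp at hb
        subst hb
        exact fun hav => h2 (hav ▸ ha)⟩
    · intro w hw
      rcases List.mem_append.mp hw with hw | hw
      · exact h.2 w hw
      · simp at hw
        subst hw
        exact Or.inr h1.1
  · exact h

theorem pvFold_inv (lv : Nat) (vis1 : List Int) (start : Int) :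
    ∀ (xs S : List Int), pvSInv lv start S →
      pvSInv lv start (xs.foldl (pvAdd lv vis1) S) := by
  intro xs
  induction xs with
  | nil => intro S h; exact h
  | cons x xs ih =>
    intro S h
    exact ih _ (pvAdd_inv lv vis1 start S x h)

-- a Nodup list of start-or-in-range ints has at most 2*lv + 2 elements
theorem pvSInv_length (lv : Nat) (start : Int) (S : List Int)
    (h : pvSInv lv start S) : S.length ≤ 2 * lv + 2 := by
  have hsub : S.toFinset ⊆ insert start (Finset.Icc (-(lv : Int)) (lv : Int)) := by
    intro v hv
    rw [List.mem_toFinset] at hv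
    rcases h.2 v hv with rfl | hIR
    · exact Finset.mem_insert_self _ _
    · exact Finset.mem_insert_of_mem (Finset.mem_Icc.mpr ⟨hIR.1, le_of_lt hIR.2⟩)
  have h1 : S.toFinset.card = S.length := List.toFinset_card_of_nodup h.1
  have h2 := Finset.card_le_card hsub
  have h3 := Finset.card_insert_le start (Finset.Icc (-(lv : Int)) (lv : Int))
  have h4 : (Finset.Icc (-(lv : Int)) (lv : Int)).card = 2 * lv + 1 := by
    rw [Int.card_Icc]
    omega
  omega

theorem pvIter_subset (grafo : List (List Int)) (lv : Nat) (vis1 : List Int) :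
    ∀ (n : Nat) (S : List Int), S ⊆ (pvStep grafo lv vis1)^[n] S := by
  intro n
  induction n with
  | zero => intro S; exact fun _ h => h
  | succ n ih =>
    intro S
    rw [Function.iterate_succ_apply]
    exact (pvFold_subset lv vis1 _ S).trans (ih _)

theorem pvIter_fix (grafo : List (List Int)) (lv : Nat) (vis1 : List Int) (start : Int) :
    ∀ (n : Nat) (S : List Int), pvSInv lv start S → 2 * lv + 3 ≤ n + S.length →
      pvStep grafo lv vis1 ((pvStep grafo lv vis1)^[n] S)
        = (pvStep grafo lv vis1)^[n] S := by
  intro n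
  induction n with
  | zero =>
    intro S hInv hb
    exfalso
    have := pvSInv_length lv start S hInv
    omega
  | succ n ih =>
    intro S hInv hb
    by_cases hfix : pvStep grafo lv vis1 S = S
    · rw [Function.iterate_fixed hfix]
      exact hfix
    · rw [Function.iterate_succ_apply]
      refine ih _ (pvFold_inv lv vis1 start _ S hInv) ?_
      obtain ⟨t, ht⟩ := pvFold_append lv vis1 (S.flatMap (pvRow grafo)) S
      have htne : t ≠ [] := by
        intro h0
        apply hfix
        unfold pvStep
        rw [ht, h0, List.append_nil]
      have : 1 ≤ t.length := List.length_pos_iff.mpr htne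
      have hlen : (pvStep grafo lv vis1 S).length = S.length + t.length := by
        unfold pvStep
        rw [ht, List.length_append]
      omega

theorem pvStep_closed (grafo : List (List Int)) (lv : Nat) (vis1 : List Int)
    (E : List Int) (hfix : pvStep grafo lv vis1 E = E) (n v : Int) (hn : n ∈ E)
    (hv : v ∈ pvRow grafo n) (hIR : PySem.Raise.InRange lv v)
    (h0 : vis1.getD (pvRes lv v) 0 = 0) : v ∈ E := by
  have hmem : v ∈ E.flatMap (pvRow grafo) := List.mem_flatMap.mpr ⟨n, hn, hv⟩
  have := pvFold_mem lv vis1 (E.flatMap (pvRow grafo)) E v hmem hIR h0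
  rwa [show (E.flatMap (pvRow grafo)).foldl (pvAdd lv vis1) E
        = pvStep grafo lv vis1 E from rfl, hfix] at this

-- ---- equivalence of the two loops (independent of Pre_) ----

-- step lemmas for B's loop
theorem es9vB_nil (grafo : List (List Int)) (vis : List Int) (k : Int) :
    es9vB grafo vis [] k = k := by
  unfold es9vB; rfl

theorem es9vB_cons_hit (grafo : List (List Int)) (vis : List Int) (n : Int)
    (rest : List Int) (k : Int) (hg : PySem.List.pyGet? vis n = some 0) :
    es9vB grafo vis (n :: rest) k =
      es9vB grafo (PySem.List.pySetD vis n 1) (PySem.List.pyGetD grafo n [] ++ rest)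
        (k + if PySem.List.pyGetD grafo n [] = [] then 1 else 0) := by
  conv_lhs => unfold es9vB
  split
  · rename_i v heq
    rw [heq] at hg
    injection hg with hg
    simp [← hg]
  · rename_i heq
    rw [heq] at hg
    simp at hg

theorem es9vB_cons_miss (grafo : List (List Int)) (vis : List Int) (n : Int)
    (rest : List Int) (k : Int) (v : Int) (hg : PySem.List.pyGet? vis n = some v)
    (hv : v ≠ 0) :
    es9vB grafo vis (n :: rest) k = es9vB grafo vis rest k := by
  conv_lhs => unfold es9vB
  split
  · rename_i v' heq
    rw [heq] at hg
    injection hg with hg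
    simp [hg, hv]
  · rfl

-- simulation: one recursive call of A equals B processing that node popped unvisited
def CallSim (fuel : Nat) : Prop :=
  ∀ (grafo : List (List Int)) (nodo : Int) (vis : List Int) (c : Int) (vis' : List Int)
    (rest : List Int) (k : Int),
    PySem.List.pyGet? vis nodo = some 0 →
    es9vA fuel grafo nodo vis = some (c, vis') →
    es9vB grafo vis (nodo :: rest) k = es9vB grafo vis' rest (k + c)

theorem loopSim (fuel : Nat) (hCS : CallSim fuel) :
    ∀ (adjR : List Int) (grafo : List (List Int)) (vis : List Int) (c0 c : Int)
      (vis' : List Int) (rest : List Int) (k : Int),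
      es9vLoop fuel grafo adjR c0 vis = some (c, vis') →
      es9vB grafo vis (adjR ++ rest) k = es9vB grafo vis' rest (k + (c - c0)) := by
  intro adjR
  induction adjR with
  | nil =>
    intro grafo vis c0 c vis' rest k h
    unfold es9vLoop at h
    injection h with h
    have h1 : c0 = c := congrArg Prod.fst h
    have h2 : vis = vis' := congrArg Prod.snd h
    subst h1; subst h2
    simp
  | cons next restAdj ih =>
    intro grafo vis c0 c vis' rest k h
    unfold es9vLoop at h
    split at h
    · rename_i v heq
      split_ifs at h with hv
      · subst hv
        split at h
        · rename_i c1 vis1 hA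
          rw [List.cons_append, hCS grafo next vis c1 vis1 (restAdj ++ rest) k heq hA,
            ih grafo vis1 (c0 + c1) c vis' rest (k + c1) h]
          ring_nf
        · simp at h
      · rw [List.cons_append, es9vB_cons_miss grafo vis next (restAdj ++ rest) k v heq hv]
        exact ih grafo vis c0 c vis' rest k h
    · simp at h

theorem callSim : ∀ fuel, CallSim fuel := by
  intro fuel
  induction fuel with
  | zero =>
    intro grafo nodo vis c vis' rest k _ hA
    unfold es9vA at hA
    simp at hA
  | succ fuel ih =>
    intro grafo nodo vis c vis' rest k hg hA
    unfold es9vA at hA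
    split at hA
    · rename_i vis1 adj hs ha
      rw [es9vB_cons_hit grafo vis nodo rest k hg]
      have hset : PySem.List.pySetD vis nodo 1 = vis1 := by
        unfold PySem.List.pySetD; rw [hs]; rfl
      have hadj : PySem.List.pyGetD grafo nodo [] = adj := by
        unfold PySem.List.pyGetD; rw [ha]; rfl
      rw [hset, hadj,
        loopSim fuel ih adj grafo vis1 (if adj = [] then 1 else 0) c vis' rest
          (k + if adj = [] then 1 else 0) hA]
      ring_nf
    · simp at hA

-- ---- under Pre_, A's port returns some ----

-- monotone-marking relation: every cell of vis that is still 0 was 0 in vis1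
def pvInv (vis1 vis : List Int) : Prop :=
  ∀ c : Nat, c < vis1.length → vis.getD c 0 = 0 → vis1.getD c 0 = 0

theorem pvInv_set (vis1 vis : List Int) (hI : pvInv vis1 vis) (j : Nat) :
    pvInv vis1 (vis.set j 1) := by
  intro c hc h0
  by_cases hcj : c = j
  · subst hcj
    by_cases hlt : c < vis.length
    · rw [List.getD_eq_getElem?_getD, List.getElem?_set_self hlt] at h0
      exact absurd h0 (by decide)
    · rw [List.set_eq_of_length_le (by omega)] at h0
      exact hI c hc h0
  · rw [List.getD_eq_getElem?_getD, List.getElem?_set_ne (by omega),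
      ← List.getD_eq_getElem?_getD] at h0
    exact hI c hc h0

-- the traversal context: vis1 has length lv, every closure member's row is well
-- formed, and the closure is closed under enterable successors
def pvEnv (grafo : List (List Int)) (lv : Nat) (vis1 : List Int) (E : List Int) : Prop :=
  vis1.length = lv ∧
  (∀ n ∈ E, PySem.Raise.InRange grafo.length n ∧ pvRowOk lv vis1 E (pvRow grafo n)) ∧
  (∀ n v : Int, n ∈ E → v ∈ pvRow grafo n → PySem.Raise.InRange lv v →
    vis1.getD (pvRes lv v) 0 = 0 → v ∈ E)

def CallSomeP (grafo : List (List Int)) (lv : Nat) (vis1 : List Int) (E : List Int)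
    (fuel : Nat) : Prop :=
  ∀ (nodo : Int) (vis : List Int),
    pvEnv grafo lv vis1 E → nodo ∈ E → PySem.Raise.InRange lv nodo →
    vis.length = lv →
    pvInv vis1 (PySem.List.pySetD vis nodo 1) →
    pvZeros vis + (if PySem.List.pyGet? vis nodo = some 0 then 0 else 1) ≤ fuel →
    ∃ c vis', es9vA fuel grafo nodo vis = some (c, vis') ∧
      vis'.length = lv ∧ pvInv vis1 vis' ∧
      pvZeros vis' ≤ pvZeros (PySem.List.pySetD vis nodo 1)

theorem loopSome (grafo : List (List Int)) (lv : Nat) (vis1 : List Int) (E : List Int)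
    (fuel : Nat) (hCS : CallSomeP grafo lv vis1 E fuel) :
    ∀ (adjR : List Int) (vis : List Int) (c0 : Int),
      pvEnv grafo lv vis1 E → pvRowOk lv vis1 E adjR →
      vis.length = lv → pvInv vis1 vis → pvZeros vis ≤ fuel →
      ∃ c vis', es9vLoop fuel grafo adjR c0 vis = some (c, vis') ∧
        vis'.length = lv ∧ pvInv vis1 vis' ∧ pvZeros vis' ≤ pvZeros vis := by
  intro adjR
  induction adjR with
  | nil =>
    intro vis c0 _ _ hlen hInv _
    exact ⟨c0, vis, by unfold es9vLoop; rfl, hlen, hInv, le_refl _⟩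
  | cons next restAdj ih =>
    intro vis c0 henv hRow hlen hInv hfuel
    obtain ⟨hIRv, hEnter⟩ := hRow next List.mem_cons_self
    have hIRvis : PySem.Raise.InRange vis.length next := by rwa [hlen]
    have hget := pyGet?_eq_some_getD vis next 0 hIRvis
    have hRowRest : pvRowOk lv vis1 E restAdj :=
      fun v hv => hRow v (List.mem_cons_of_mem _ hv)
    have hkveq : pvRes vis.length next = pvRes lv next := by rw [hlen]
    by_cases hv : vis.getD (pvRes vis.length next) 0 = 0
    · -- unvisited: B enters the node, A recurses
      have hguard : PySem.List.pyGet? vis next = some 0 := by rw [hget, hv]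
      have hkvlt : pvRes lv next < lv := (pvRes_spec lv next hIRv).2
      have hcell : vis1.getD (pvRes lv next) 0 = 0 :=
        hInv _ (by rw [henv.1]; exact hkvlt) (hkveq ▸ hv)
      have hnE : next ∈ E := hEnter hcell
      have hsetD : PySem.List.pySetD vis next 1 = vis.set (pvRes vis.length next) 1 :=
        pySetD_eq_set vis next 1 hIRvis
      have hInvSet : pvInv vis1 (PySem.List.pySetD vis next 1) := by
        rw [hsetD]; exact pvInv_set vis1 vis hInv _
      obtain ⟨c1, vis', hA, hlen', hInv', hz'⟩ :=
        hCS next vis henv hnE hIRv hlen hInvSet (by rw [if_pos hguard]; omega)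
      have hzlt : pvZeros (PySem.List.pySetD vis next 1) < pvZeros vis :=
        pvZeros_pySetD_lt vis next hguard
      obtain ⟨c, vis'', hL, hlen'', hInv'', hz''⟩ := ih vis' (c0 + c1) henv hRowRest
        hlen' hInv' (by omega)
      refine ⟨c, vis'', ?_, hlen'', hInv'', by omega⟩
      unfold es9vLoop
      rw [hguard]
      simp only [reduceIte, hA]
      exact hL
    · -- already visited: skip
      obtain ⟨c, vis', hL, hlen', hInv', hz'⟩ := ih vis c0 henv hRowRest hlen hInv hfuel
      refine ⟨c, vis', ?_, hlen', hInv', hz'⟩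
      unfold es9vLoop
      rw [hget]
      simp only [if_neg hv]
      exact hL

theorem callSome (grafo : List (List Int)) (lv : Nat) (vis1 : List Int) (E : List Int) :
    ∀ fuel, CallSomeP grafo lv vis1 E fuel := by
  intro fuel
  induction fuel with
  | zero =>
    intro nodo vis _ _ _ _ _ hfuel
    exfalso
    split_ifs at hfuel with h
    · have := pvZeros_pos_of_get vis nodo h
      omega
    · omega
  | succ fuel ih =>
    intro nodo vis henv hnE hIRv hlen hInvSet hfuel
    obtain ⟨hIRg, hRowN⟩ := henv.2.1 nodo hnE
    have hIRvis : PySem.Raise.InRange vis.length nodo := by rwa [hlen]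
    have hkvlt : pvRes vis.length nodo < vis.length :=
      (pvRes_spec vis.length nodo hIRvis).2
    have hset := pySet?_eq_set vis nodo 1 hIRvis
    have hsetD : PySem.List.pySetD vis nodo 1 = vis.set (pvRes vis.length nodo) 1 :=
      pySetD_eq_set vis nodo 1 hIRvis
    have hgetg := pyGet?_eq_some_getD grafo nodo [] hIRg
    have hget := pyGet?_eq_some_getD vis nodo 0 hIRvis
    have hz1 : pvZeros (vis.set (pvRes vis.length nodo) 1) ≤ fuel := by
      rw [pvZeros_set vis _ hkvlt]
      by_cases hv : vis[pvRes vis.length nodo] = 0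
      · have hgz : PySem.List.pyGet? vis nodo = some 0 := by
          rw [hget, List.getD_eq_getElem _ 0 hkvlt, hv]
        rw [if_pos hgz] at hfuel
        have := pvZeros_pos_of_get vis nodo hgz
        simp only [if_pos hv]
        omega
      · have hgz : ¬ PySem.List.pyGet? vis nodo = some 0 := by
          rw [hget, List.getD_eq_getElem _ 0 hkvlt]
          intro hc
          exact hv (by injection hc)
        rw [if_neg hgz] at hfuel
        simp only [if_neg hv]
        omega
    obtain ⟨c, vis', hL, hlen', hInv', hz'⟩ := loopSome grafo lv vis1 E fuel ih
      (pvRow grafo nodo) (vis.set (pvRes vis.length nodo) 1)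
      (if pvRow grafo nodo = [] then 1 else 0)
      henv hRowN
      (by rw [List.length_set]; exact hlen) (by rw [← hsetD]; exact hInvSet) hz1
    refine ⟨c, vis', ?_, hlen', hInv', ?_⟩
    · unfold es9vA
      rw [hset, hgetg]
      exact hL
    · rw [hsetD]
      exact hz'

-- ===== VERDICT (by name: the statement is the Claim_ definition above) =====
theorem es9v_spec : Claim_equal_es9v := by
  intro grafo nodoStart visitati _ hPre
  obtain ⟨hIRg, hIRv, hCtx⟩ := hPre
  unfold Spec_es9v
  have hlv : (visitati.set (pvRes visitati.length nodoStart) 1).length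
      = visitati.length := List.length_set ..
  have hzb : pvZeros visitati ≤ visitati.length := List.countP_le_length
  have hsetD : PySem.List.pySetD visitati nodoStart 1 =
      visitati.set (pvRes visitati.length nodoStart) 1 :=
    pySetD_eq_set visitati nodoStart 1 hIRv
  -- the closure set and its properties
  have hfix : pvStep grafo visitati.length
      (visitati.set (pvRes visitati.length nodoStart) 1)
      (pvE grafo nodoStart visitati) = pvE grafo nodoStart visitati := by
    unfold pvE
    exact pvIter_fix grafo visitati.length _ nodoStart _ [nodoStart]
      ⟨List.nodup_singleton _, fun v hv => Or.inl (by simpa using hv)⟩ (by simp)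
  have hstart : nodoStart ∈ pvE grafo nodoStart visitati := by
    unfold pvE
    exact pvIter_subset grafo visitati.length _ _ [nodoStart] (by simp)
  have henv : pvEnv grafo visitati.length
      (visitati.set (pvRes visitati.length nodoStart) 1)
      (pvE grafo nodoStart visitati) :=
    ⟨hlv, hCtx, fun n v hn hv hIR h0 =>
      pvStep_closed grafo visitati.length _ _ hfix n v hn hv hIR h0⟩
  obtain ⟨c, vis', hA, _, _, _⟩ :=
    callSome grafo visitati.length (visitati.set (pvRes visitati.length nodoStart) 1)
      (pvE grafo nodoStart visitati) (visitati.length + 1) nodoStart visitati henv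
      hstart hIRv rfl
      (by rw [hsetD]; intro c hc h0; exact h0)
      (by split_ifs <;> omega)
  have hAval : es9v grafo nodoStart visitati = c := by
    unfold es9v; rw [hA]
  have hset := pySet?_eq_set visitati nodoStart 1 hIRv
  have hgetg := pyGet?_eq_some_getD grafo nodoStart [] hIRg
  have hLoop : es9vLoop visitati.length grafo
      (grafo.getD (pvRes grafo.length nodoStart) [])
      (if grafo.getD (pvRes grafo.length nodoStart) [] = [] then 1 else 0)
      (visitati.set (pvRes visitati.length nodoStart) 1) = some (c, vis') := by
    unfold es9vA at hA
    rw [hset, hgetg] at hA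
    exact hA
  have hred : es9v_alt grafo nodoStart visitati =
      es9vB grafo (visitati.set (pvRes visitati.length nodoStart) 1)
        (grafo.getD (pvRes grafo.length nodoStart) [])
        (if grafo.getD (pvRes grafo.length nodoStart) [] = [] then 1 else 0) := by
    unfold es9v_alt
    rw [hset, hgetg]
  have hsim := loopSim visitati.length (callSim _)
    (grafo.getD (pvRes grafo.length nodoStart) []) grafo
    (visitati.set (pvRes visitati.length nodoStart) 1)
    (if grafo.getD (pvRes grafo.length nodoStart) [] = [] then 1 else 0) c vis' []
    (if grafo.getD (pvRes grafo.length nodoStart) [] = [] then 1 else 0) hLoop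
  rw [List.append_nil] at hsim
  rw [hAval, hred, hsim, es9vB_nil]
  ring
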